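-- pv_equiv track=rewrite | github.com/Xevion/thaumic-itemstack | thaumic.py | sort_aspect_sum
-- ===== SOURCE A (Python) =====
-- def sort_aspect_sum(current, aspects, targets=None, descending=False):
--     # Target is specified, have to account for the new maximum coefficient
--     if targets:
--         coefficient = 0
--         for aspectDict in aspects:
--             # Calculate which targets are in the aspectDict
--             available = [target for target in targets if target in aspectDict.keys()]
--             # If any are in it
--             if len(available) > 0:
--                 # Calculate the sum of the target aspect's count's
--                 # length of available is taken into account, items with higher target counts are prioritized
--                 coefficient = max(coefficient, sum([aspectDict[target] for target in available]))
--     # Target is not specified, get a blanket sum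
--     elif not targets:
--         coefficient = max(list(map(sum, [x.values() for x in aspects])))
--     # Multiply key list by coefficient
--     current = list(map(lambda x : x * (coefficient + 1), current))
--     # Target is specified
--     if targets:
--         # Descending: += (coefficient - value)
--         # Ascending: += (value)
--         if descending:
--             for index in range(len(current)):
--                 # If the target aspect is actually in the dictionary
--                 # then add it's count as the key 'change'
--                 # edit: changed to allow for list of targets, using sum()
--                 available = [target for target in targets if target in aspects[index].keys()]
--                 if len(available) > 0:
--                     current[index] += sum([aspects[index][target] for target in available])
--         elif not descending:
--             for index in range(len(current)):
--                 available = [target for target in targets if target in aspects[index].keys()]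
--                 if len(available) > 0:
--                     current[index] += coefficient - (sum([aspects[index][target] for target in available]))
--     elif not targets:
--         if descending:
--             for index in range(len(current)):
--                 # Just add the sum instead
--                 current[index] += sum(aspects[index].values())
--         elif not descending:
--             for index in range(len(current)):
--                 current[index] += coefficient - sum(aspects[index].values())
--     return current
-- ===== SOURCE B (Python) =====
-- def sort_aspect_sum(current, aspects, targets=None, descending=False):
--     # Target-major inversion: instead of scanning targets inside each aspect dict,
--     # loop over targets once, accumulating per-aspect presence flags and hit sums.
--     if targets:
--         present = [False] * len(aspects)
--         hits = [0] * len(aspects)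
--         for t in targets:
--             present = [p or (t in d) for p, d in zip(present, aspects)]
--             hits = [h + (d[t] if t in d else 0) for h, d in zip(hits, aspects)]
--         coefficient = 0
--         for p, s in zip(present, hits):
--             if p:
--                 coefficient = max(coefficient, s)
--         out = []
--         for x, p, s in zip(current, present, hits):
--             y = x * (coefficient + 1)
--             if p:
--                 y += s if descending else coefficient - s
--             out.append(y)
--         return out
--     else:
--         totals = [sum(d.values()) for d in aspects]
--         coefficient = max(totals)
--         return [x * (coefficient + 1) + (s if descending else coefficient - s)
--                 for x, s in zip(current, totals)]
-- ===== Notes on version B (the rewrite author's own statement) =====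
-- stated objective: alternative
-- what changed: B inverts the loop nesting in the targets case: instead of scanning the target list inside each aspect dict (twice, in four near-duplicate index-mutation loops), it loops over targets once, scattering into per-aspect presence flags and hit-sum accumulators, then takes one max over the flagged sums and builds the output in a single zip pass.
import Mathlib
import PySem

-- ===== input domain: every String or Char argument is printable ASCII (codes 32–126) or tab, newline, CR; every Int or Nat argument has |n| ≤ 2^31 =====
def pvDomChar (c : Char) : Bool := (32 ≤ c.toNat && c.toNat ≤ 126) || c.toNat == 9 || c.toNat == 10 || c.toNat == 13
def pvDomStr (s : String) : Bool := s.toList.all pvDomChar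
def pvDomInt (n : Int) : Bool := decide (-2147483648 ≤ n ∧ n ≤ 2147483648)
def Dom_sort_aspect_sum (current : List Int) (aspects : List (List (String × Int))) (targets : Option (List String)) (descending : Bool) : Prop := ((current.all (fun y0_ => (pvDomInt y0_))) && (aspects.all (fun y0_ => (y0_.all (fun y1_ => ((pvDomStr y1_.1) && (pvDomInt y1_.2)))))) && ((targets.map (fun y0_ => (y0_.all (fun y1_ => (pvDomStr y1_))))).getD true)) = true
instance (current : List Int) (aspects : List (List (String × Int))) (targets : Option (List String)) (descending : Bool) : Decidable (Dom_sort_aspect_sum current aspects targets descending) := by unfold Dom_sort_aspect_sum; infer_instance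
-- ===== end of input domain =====

-- B inverts the loop nesting in the targets case: one pass over targets scattering into
-- per-aspect presence/hit-sum accumulators, one max, one zip pass building the output.


-- ===== PORT A =====
-- Python truthiness of the `targets` parameter: true iff a non-empty list.
def pvTruthy : Option (List String) → Bool
  | some (_ :: _) => true
  | _ => false

-- the list behind `targets` (only read where A's code reads it, i.e. when truthy)
def pvTs : Option (List String) → List String
  | some ts => ts
  | none => []

def sort_aspect_sum (current : List Int) (aspects : List (List (String × Int))) (targets : Option (List String)) (descending : Bool) : List Int :=
  let ts := pvTs targets
  let coefficient :=
    if pvTruthy targets then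
      aspects.foldl (fun coefficient aspectDict =>
        let available := ts.filter (fun target => (PySem.Dict.mk aspectDict).contains target)
        if available.length > 0 then
          max coefficient ((available.map (fun target => (PySem.Dict.mk aspectDict).getD target 0)).sum)
        else coefficient) 0
    else
      -- max(...) raises ValueError on empty aspects: excluded by Pre_; getD 0 is the total form
      (PySem.List.max? (aspects.map (fun x => (PySem.Dict.mk x).values.sum)) (fun y => y)).getD 0
  let current2 := current.map (fun x => x * (coefficient + 1))
  if pvTruthy targets then
    if descending then
      (PySem.List.pyRange 0 (current2.length : Int) 1).foldl (fun cur index =>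
        -- aspects[index]: in range under Pre_ (IndexError otherwise); pyGetD/pySetD are the total forms
        let aspectDict := PySem.Dict.mk (PySem.List.pyGetD aspects index [])
        let available := ts.filter (fun target => aspectDict.contains target)
        if available.length > 0 then
          PySem.List.pySetD cur index (PySem.List.pyGetD cur index 0 +
            (available.map (fun target => aspectDict.getD target 0)).sum)
        else cur) current2
    else
      (PySem.List.pyRange 0 (current2.length : Int) 1).foldl (fun cur index =>
        let aspectDict := PySem.Dict.mk (PySem.List.pyGetD aspects index [])
        let available := ts.filter (fun target => aspectDict.contains target)
        if available.length > 0 then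
          PySem.List.pySetD cur index (PySem.List.pyGetD cur index 0 +
            (coefficient - (available.map (fun target => aspectDict.getD target 0)).sum))
        else cur) current2
  else
    if descending then
      (PySem.List.pyRange 0 (current2.length : Int) 1).foldl (fun cur index =>
        PySem.List.pySetD cur index (PySem.List.pyGetD cur index 0 +
          (PySem.Dict.mk (PySem.List.pyGetD aspects index [])).values.sum)) current2
    else
      (PySem.List.pyRange 0 (current2.length : Int) 1).foldl (fun cur index =>
        PySem.List.pySetD cur index (PySem.List.pyGetD cur index 0 +
          (coefficient - (PySem.Dict.mk (PySem.List.pyGetD aspects index [])).values.sum))) current2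

-- ===== PORT B =====
-- one scatter step of Source B's target loop: rebuild (present, hits) from one target
def pvScatter (aspects : List (List (String × Int))) (st : List Bool × List Int) (t : String) :
    List Bool × List Int :=
  ((st.1.zip aspects).map (fun q => q.1 || (PySem.Dict.mk q.2).contains t),
   (st.2.zip aspects).map (fun q =>
     q.1 + (if (PySem.Dict.mk q.2).contains t then (PySem.Dict.mk q.2).getD t 0 else 0)))

def sort_aspect_sum_alt (current : List Int) (aspects : List (List (String × Int))) (targets : Option (List String)) (descending : Bool) : List Int :=
  match targets with
  | some (t0 :: trest) =>
    let ph := (t0 :: trest).foldl (pvScatter aspects)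
      (List.replicate aspects.length false, List.replicate aspects.length (0 : Int))
    let coefficient := (ph.1.zip ph.2).foldl (fun c q => if q.1 then max c q.2 else c) 0
    (current.zip (ph.1.zip ph.2)).foldl (fun out p =>
      let y := p.1 * (coefficient + 1)
      out ++ [if p.2.1 then y + (if descending then p.2.2 else coefficient - p.2.2) else y]) []
  | _ =>
    let totals := aspects.map (fun d => (PySem.Dict.mk d).values.sum)
    let coefficient := (PySem.List.max? totals (fun y => y)).getD 0
    (current.zip totals).map (fun p =>
      p.1 * (coefficient + 1) + (if descending then p.2 else coefficient - p.2))

-- ===== PRECONDITION & SPEC =====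
-- Pre_ is exactly where Python A returns: aspects must cover every index of current (else the
-- second loop's aspects[index] raises IndexError), and with no/empty targets the blanket
-- max() over aspects raises ValueError when aspects is empty.
def Pre_sort_aspect_sum (current : List Int) (aspects : List (List (String × Int))) (targets : Option (List String)) (descending : Bool) : Prop :=
  current.length ≤ aspects.length ∧ (pvTruthy targets = false → aspects ≠ [])
instance (current : List Int) (aspects : List (List (String × Int))) (targets : Option (List String)) (descending : Bool) : Decidable (Pre_sort_aspect_sum current aspects targets descending) := by unfold Pre_sort_aspect_sum; infer_instance

def pvWitness_sort_aspect_sum : List Int × (List (List (String × Int))) × Option (List String) × Bool :=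
  ([1, 2], [[("a", 3)], [("b", 1)]], some ["a"], false)

def Spec_sort_aspect_sum (current : List Int) (aspects : List (List (String × Int))) (targets : Option (List String)) (descending : Bool) (out : List Int) : Prop := out = sort_aspect_sum_alt current aspects targets descending
instance (current : List Int) (aspects : List (List (String × Int))) (targets : Option (List String)) (descending : Bool) (out : List Int) : Decidable (Spec_sort_aspect_sum current aspects targets descending out) := by unfold Spec_sort_aspect_sum; infer_instance

-- ===== CLAIM (what is proved, stated in full; the proofs are below) =====
def Claim_equal_sort_aspect_sum : Prop := ∀ (current : List Int) (aspects : List (List (String × Int))) (targets : Option (List String)) (descending : Bool), Dom_sort_aspect_sum current aspects targets descending → Pre_sort_aspect_sum current aspects targets descending → Spec_sort_aspect_sum current aspects targets descending (sort_aspect_sum current aspects targets descending)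

-- ===== LEMMAS AND PROOFS =====

-- A's in-place index loop `for i in range(len(xs)): xs[i] = g(i, xs[i])` is mapIdx.
theorem pv_setloop (P : Int → Prop) [DecidablePred P] (F : Int → Int → Int) : ∀ (post pre : List Int),
    (PySem.List.pyRange (pre.length : Int) ((pre.length + post.length : Nat) : Int) 1).foldl
      (fun cur i => if P i then PySem.List.pySetD cur i (F i (PySem.List.pyGetD cur i 0)) else cur)
      (pre ++ post)
    = pre ++ post.mapIdx (fun i x =>
        if P ((pre.length + i : Nat) : Int) then F ((pre.length + i : Nat) : Int) x else x) := by
  intro post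
  induction post with
  | nil => intro pre; simp [PySem.List.pyRange_one_eq_nil]
  | cons x rest ih =>
    intro pre
    rw [PySem.List.pyRange_one_cons (by simp only [List.length_cons]; omega)]
    simp only [List.foldl_cons]
    have hget : PySem.List.pyGetD (pre ++ x :: rest) (pre.length : Int) 0 = x := by
      simp [List.getD]
    have hstep : (if P (pre.length : Int) then
          PySem.List.pySetD (pre ++ x :: rest) (pre.length : Int)
            (F (pre.length : Int) (PySem.List.pyGetD (pre ++ x :: rest) (pre.length : Int) 0))
        else pre ++ x :: rest)
        = (pre ++ [if P (pre.length : Int) then F (pre.length : Int) x else x]) ++ rest := by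
      split_ifs with hP
      · rw [hget]; simp
      · simp
    rw [hstep]
    have hlen : (((pre ++ [if P (pre.length : Int) then F (pre.length : Int) x else x]).length : Nat) : Int)
        = (pre.length : Int) + 1 := by simp
    have := ih (pre ++ [if P (pre.length : Int) then F (pre.length : Int) x else x])
    rw [hlen] at this
    have hlen2 : (((pre ++ [if P (pre.length : Int) then F (pre.length : Int) x else x]).length + rest.length : Nat) : Int)
        = ((pre.length + (x :: rest).length : Nat) : Int) := by
      simp
      omega
    rw [hlen2] at this
    rw [this]
    have hfun : (fun (i : Nat) (y : Int) =>
          if P ((((pre ++ [if P (pre.length : Int) then F (pre.length : Int) x else x]).length + i : Nat) : Int))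
          then F ((((pre ++ [if P (pre.length : Int) then F (pre.length : Int) x else x]).length + i : Nat) : Int)) y
          else y)
        = fun (i : Nat) (y : Int) =>
          if P (((pre.length + (i + 1) : Nat) : Int)) then F (((pre.length + (i + 1) : Nat) : Int)) y else y := by
      funext i y
      have hidx : ((((pre ++ [if P (pre.length : Int) then F (pre.length : Int) x else x]).length + i : Nat) : Int))
          = (((pre.length + (i + 1) : Nat) : Int)) := by simp; ring
      rw [hidx]
    rw [hfun]
    simp [List.mapIdx_cons]

theorem pv_setloop_zero (P : Int → Prop) [DecidablePred P] (F : Int → Int → Int) (xs : List Int) :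
    (PySem.List.pyRange 0 (xs.length : Int) 1).foldl
      (fun cur i => if P i then PySem.List.pySetD cur i (F i (PySem.List.pyGetD cur i 0)) else cur) xs
    = xs.mapIdx (fun i x => if P (i : Int) then F (i : Int) x else x) := by
  have := pv_setloop P F xs []
  simpa using this

-- B's scatter loop characterised: the final (present, hits) are pointwise maps over aspects.
theorem pv_scatter_char (aspects : List (List (String × Int))) : ∀ (ts : List String)
    (g0 : List (String × Int) → Bool) (h0 : List (String × Int) → Int),
    ts.foldl (pvScatter aspects) (aspects.map g0, aspects.map h0)
    = (aspects.map (fun d => g0 d || ts.any (fun t => (PySem.Dict.mk d).contains t)),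
       aspects.map (fun d => h0 d +
         ((ts.filter (fun t => (PySem.Dict.mk d).contains t)).map
           (fun t => (PySem.Dict.mk d).getD t 0)).sum)) := by
  intro ts
  induction ts with
  | nil => intro g0 h0; simp
  | cons t rest ih =>
    intro g0 h0
    have hstep : pvScatter aspects (aspects.map g0, aspects.map h0) t
        = (aspects.map (fun d => g0 d || (PySem.Dict.mk d).contains t),
           aspects.map (fun d => h0 d +
             (if (PySem.Dict.mk d).contains t then (PySem.Dict.mk d).getD t 0 else 0))) := by
      unfold pvScatter
      simp only [Prod.mk.injEq]
      constructor <;>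
      · apply List.ext_getElem
        · simp
        · intro m h1 h2
          simp only [List.getElem_map, List.getElem_zip]
    rw [List.foldl_cons, hstep, ih]
    simp only [Prod.mk.injEq]
    constructor
    · apply List.map_congr_left; intro d _; simp [Bool.or_assoc]
    · apply List.map_congr_left; intro d _
      by_cases h : (d.any fun p => p.1 == t) = true <;>
        simp [PySem.Dict.contains, h] <;> ring

-- a target is "present" iff A's filtered availability list is non-empty
theorem pv_avail_iff (ts : List String) (d : List (String × Int)) :
    (ts.filter (fun t => (PySem.Dict.mk d).contains t)).length > 0
    ↔ (ts.any (fun t => (PySem.Dict.mk d).contains t)) = true := by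
  rw [gt_iff_lt, List.length_pos_iff]
  simp only [ne_eq, List.filter_eq_nil_iff, List.any_eq_true, not_forall]
  tauto

-- ===== VERDICT (by name: the statement is the Claim_ definition above) =====
theorem sort_aspect_sum_spec : Claim_equal_sort_aspect_sum := by
  intro current aspects targets descending _ hpre
  obtain ⟨hlen, hne⟩ := hpre
  unfold Spec_sort_aspect_sum sort_aspect_sum sort_aspect_sum_alt
  rcases targets with _ | ⟨_ | ⟨t0, trest⟩⟩ <;>
    simp only [pvTruthy, pvTs, Bool.false_eq_true, if_false, if_true]
  · set c := (PySem.List.max? (aspects.map (fun x => (PySem.Dict.mk x).values.sum)) fun y => y).getD 0 with hc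
    set cur2 := current.map (fun x => x * (c + 1)) with hcur2
    have hl2 : cur2.length = current.length := by rw [hcur2]; simp
    cases descending
    · have key := pv_setloop_zero (fun _ => True) (fun i y => y +
        (c - (PySem.Dict.mk (PySem.List.pyGetD aspects i [])).values.sum)) cur2
      simp only [if_true] at key
      simp only [Bool.false_eq_true, if_false]
      rw [key]
      apply List.ext_getElem
      · simp [hl2, hlen]
      intro m h1 h2
      simp only [List.getElem_mapIdx, List.getElem_zip, List.getElem_map, hcur2]
      rw [PySem.List.pyGetD_natCast, List.getD_eq_getElem _ _ (by simp [hl2] at h1; omega)]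
    · have key := pv_setloop_zero (fun _ => True) (fun i y => y +
        (PySem.Dict.mk (PySem.List.pyGetD aspects i [])).values.sum) cur2
      simp only [if_true] at key
      simp only [if_true]
      rw [key]
      apply List.ext_getElem
      · simp [hl2, hlen]
      intro m h1 h2
      simp only [List.getElem_mapIdx, List.getElem_zip, List.getElem_map, hcur2]
      rw [PySem.List.pyGetD_natCast, List.getD_eq_getElem _ _ (by simp [hl2] at h1; omega)]
  · set c := (PySem.List.max? (aspects.map (fun x => (PySem.Dict.mk x).values.sum)) fun y => y).getD 0 with hc
    set cur2 := current.map (fun x => x * (c + 1)) with hcur2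
    have hl2 : cur2.length = current.length := by rw [hcur2]; simp
    cases descending
    · have key := pv_setloop_zero (fun _ => True) (fun i y => y +
        (c - (PySem.Dict.mk (PySem.List.pyGetD aspects i [])).values.sum)) cur2
      simp only [if_true] at key
      simp only [Bool.false_eq_true, if_false]
      rw [key]
      apply List.ext_getElem
      · simp [hl2, hlen]
      intro m h1 h2
      simp only [List.getElem_mapIdx, List.getElem_zip, List.getElem_map, hcur2]
      rw [PySem.List.pyGetD_natCast, List.getD_eq_getElem _ _ (by simp [hl2] at h1; omega)]
    · have key := pv_setloop_zero (fun _ => True) (fun i y => y +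
        (PySem.Dict.mk (PySem.List.pyGetD aspects i [])).values.sum) cur2
      simp only [if_true] at key
      simp only [if_true]
      rw [key]
      apply List.ext_getElem
      · simp [hl2, hlen]
      intro m h1 h2
      simp only [List.getElem_mapIdx, List.getElem_zip, List.getElem_map, hcur2]
      rw [PySem.List.pyGetD_natCast, List.getD_eq_getElem _ _ (by simp [hl2] at h1; omega)]
  · -- targets = some (t0 :: trest)
    set ts := t0 :: trest with hts
    -- characterise B's scattered table
    have hrep1 : List.replicate aspects.length false = aspects.map (fun _ => false) := by
      simp
    have hrep2 : List.replicate aspects.length (0 : Int) = aspects.map (fun _ => (0 : Int)) := by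
      simp
    rw [hrep1, hrep2, pv_scatter_char aspects ts (fun _ => false) (fun _ => (0 : Int))]
    simp only [Bool.false_or, zero_add]
    set P := fun (d : List (String × Int)) => ts.any (fun t => (PySem.Dict.mk d).contains t) with hP
    set S := fun (d : List (String × Int)) => ((ts.filter (fun t => (PySem.Dict.mk d).contains t)).map
      (fun t => (PySem.Dict.mk d).getD t 0)).sum with hS
    have hzip : (aspects.map P).zip (aspects.map S) = aspects.map (fun d => (P d, S d)) := by
      apply List.ext_getElem
      · simp
      · intro m h1 h2
        simp only [List.getElem_map, List.getElem_zip]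
    rw [hzip]
    -- coefficient equality
    have hcoeff : (aspects.map (fun d => (P d, S d))).foldl
          (fun c q => if q.1 then max c q.2 else c) 0
        = aspects.foldl (fun coefficient aspectDict =>
            if (ts.filter (fun target => (PySem.Dict.mk aspectDict).contains target)).length > 0 then
              max coefficient ((ts.filter (fun target => (PySem.Dict.mk aspectDict).contains target)).map
                (fun target => (PySem.Dict.mk aspectDict).getD target 0)).sum
            else coefficient) 0 := by
      rw [List.foldl_map]
      apply List.foldl_ext
      intro c d _
      by_cases h : (ts.filter (fun t => (PySem.Dict.mk d).contains t)).length > 0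
      · rw [if_pos h, if_pos ((pv_avail_iff ts d).mp h)]
      · rw [if_neg h, if_neg (fun hb => h ((pv_avail_iff ts d).mpr hb))]
    rw [hcoeff]
    set c := aspects.foldl (fun coefficient aspectDict =>
        if (ts.filter (fun target => (PySem.Dict.mk aspectDict).contains target)).length > 0 then
          max coefficient ((ts.filter (fun target => (PySem.Dict.mk aspectDict).contains target)).map
            (fun target => (PySem.Dict.mk aspectDict).getD target 0)).sum
        else coefficient) 0 with hcdef
    set cur2 := current.map (fun x => x * (c + 1)) with hcur2
    have hl2 : cur2.length = current.length := by rw [hcur2]; simp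
    -- B's output-building fold is a map
    rw [PySem.List.foldl_append_singleton_eq_map]
    have hinfo : ∀ (m : Nat) (hm : m < current.length),
        PySem.List.pyGetD aspects (m : Int) [] = aspects[m]'(by omega) := by
      intro m hm
      rw [PySem.List.pyGetD_natCast, List.getD_eq_getElem _ _ (by omega)]
    cases descending
    · have key := pv_setloop_zero
        (fun i => (List.filter (fun target =>
          (PySem.Dict.mk (PySem.List.pyGetD aspects i [])).contains target) ts).length > 0)
        (fun i y => y + (c - (List.map (fun target =>
            (PySem.Dict.mk (PySem.List.pyGetD aspects i [])).getD target 0)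
          (List.filter (fun target =>
            (PySem.Dict.mk (PySem.List.pyGetD aspects i [])).contains target) ts)).sum))
        cur2
      beta_reduce at key
      simp only [Bool.false_eq_true, if_false]
      rw [key]
      apply List.ext_getElem
      · simp [hl2, hlen]
      intro m h1 h2
      simp only [List.nil_append, List.getElem_mapIdx, List.getElem_map, List.getElem_zip, hcur2]
      rw [hinfo m (by simp [hl2] at h1; omega)]
      by_cases hp : (ts.filter (fun t =>
          (PySem.Dict.mk (aspects[m]'(by simp [hl2] at h1; omega))).contains t)).length > 0
      · rw [if_pos hp, if_pos (show _ = true from (pv_avail_iff ts _).mp hp)]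
      · rw [if_neg hp, if_neg (show ¬ _ = true from fun hb => hp ((pv_avail_iff ts _).mpr hb))]
    · have key := pv_setloop_zero
        (fun i => (List.filter (fun target =>
          (PySem.Dict.mk (PySem.List.pyGetD aspects i [])).contains target) ts).length > 0)
        (fun i y => y + (List.map (fun target =>
            (PySem.Dict.mk (PySem.List.pyGetD aspects i [])).getD target 0)
          (List.filter (fun target =>
            (PySem.Dict.mk (PySem.List.pyGetD aspects i [])).contains target) ts)).sum)
        cur2
      beta_reduce at key
      simp only [if_true]
      rw [key]
      apply List.ext_getElem
      · simp [hl2, hlen]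
      intro m h1 h2
      simp only [List.nil_append, List.getElem_mapIdx, List.getElem_map, List.getElem_zip, hcur2]
      rw [hinfo m (by simp [hl2] at h1; omega)]
      by_cases hp : (ts.filter (fun t =>
          (PySem.Dict.mk (aspects[m]'(by simp [hl2] at h1; omega))).contains t)).length > 0
      · rw [if_pos hp, if_pos (show _ = true from (pv_avail_iff ts _).mp hp)]
      · rw [if_neg hp, if_neg (show ¬ _ = true from fun hb => hp ((pv_avail_iff ts _).mpr hb))]
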